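-- pv_equiv track=rewrite | github.com/iodev/caelum-analytics | src/caelum_analytics/machine_registry.py | _get_primary_ip
-- ===== SOURCE A (Python) =====
-- from typing import Dict, List, Optional, Set
--
-- def _get_primary_ip(ip_addresses: List[str]) -> str:
--     """Get the primary IP address for the machine."""
--     # Filter out localhost
--     external_ips = [ip for ip in ip_addresses if not ip.startswith("127.")]
--
--     # Prioritize network selection for real hardware-to-hardware discovery
--     # 1. VPN networks (10.x.x.x range) - for real machine discovery
--     # 2. Common private networks (192.168.x.x, 172.16-31.x.x)
--     # 3. WSL/Docker internal networks (172.17+.x.x) - lowest priority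
--
--     # VPN networks (10.x.x.x range) - highest priority for hardware discovery
--     vpn_ips = [ip for ip in external_ips if ip.startswith("10.")]
--     if vpn_ips:
--         return vpn_ips[0]
--
--     # Standard private networks
--     standard_private_ips = [ip for ip in external_ips if ip.startswith("192.168.")]
--     if standard_private_ips:
--         return standard_private_ips[0]
--
--     # Private 172.x networks, but prefer lower ranges (172.16-31 over 172.17+)
--     private_172_ips = [ip for ip in external_ips if ip.startswith("172.")]
--     if private_172_ips:
--         # Sort to prefer 172.16-31.x.x (standard private) over 172.17+.x.x (Docker/WSL)
--         private_172_ips.sort(key=lambda ip: int(ip.split('.')[1]))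
--         return private_172_ips[0]
--
--     # Fallback to any remaining external IP
--     if external_ips:
--         return external_ips[0]
--     else:
--         return "127.0.0.1"
-- ===== SOURCE B (Python) =====
-- def _tier(ip):
--     if ip.startswith("10."):
--         return 0
--     if ip.startswith("192.168."):
--         return 1
--     if ip.startswith("172."):
--         return 2
--     return 3
--
-- def _get_primary_ip(ip_addresses):
--     """Get the primary IP address for the machine."""
--     # Pass 1: best (smallest) tier present among non-localhost addresses.
--     best = 4
--     for ip in ip_addresses:
--         if ip.startswith("127."):
--             continue
--         t = _tier(ip)
--         if t < best:
--             best = t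
--     if best == 4:
--         return "127.0.0.1"
--     if best == 2:
--         # One-pass minimum by second octet (strict <, so first wins ties).
--         choice = None
--         octet = 0
--         for ip in ip_addresses:
--             if ip.startswith("172."):
--                 o = int(ip.split('.')[1])
--                 if choice is None or o < octet:
--                     choice, octet = ip, o
--         return choice
--     # First non-localhost address of the best tier.
--     for ip in ip_addresses:
--         if not ip.startswith("127.") and _tier(ip) == best:
--             return ip
-- ===== Notes on version B (the rewrite author's own statement) =====
-- stated objective: alternative
-- what changed: Replaces A's four separate filter passes plus a stable sort of the 172.x list by one tier-minimum scan and one strict-less-than minimum scan (no sort, no intermediate filtered lists).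
import Mathlib
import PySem

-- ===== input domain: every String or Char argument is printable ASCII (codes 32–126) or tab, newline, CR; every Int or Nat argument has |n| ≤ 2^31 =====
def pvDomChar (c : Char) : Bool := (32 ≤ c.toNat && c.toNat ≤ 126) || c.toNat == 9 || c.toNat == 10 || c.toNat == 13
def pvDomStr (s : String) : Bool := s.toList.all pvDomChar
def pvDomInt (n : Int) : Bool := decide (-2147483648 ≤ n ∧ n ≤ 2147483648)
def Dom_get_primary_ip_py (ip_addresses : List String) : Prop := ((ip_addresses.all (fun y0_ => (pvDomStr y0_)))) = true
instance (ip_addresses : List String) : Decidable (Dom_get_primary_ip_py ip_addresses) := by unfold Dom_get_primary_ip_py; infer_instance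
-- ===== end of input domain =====

-- B replaces A's four filter passes + stable sort by one tier-scan and one strict-min scan (no sort); return-value equivalence, no mutation observable.

-- second octet of an address, as A's sort key computes it: int(ip.split('.')[1])
-- (getD defaults are never reached on Pre_-admitted inputs where this value matters)
def octet172 (ip : String) : Int :=
  (PySem.Int.ofStr? (((PySem.Str.split? ip ".").getD []).getD 1 "")).getD 0

-- ===== PORT A =====
def get_primary_ip_py (ip_addresses : List String) : String :=
  let external_ips := ip_addresses.filter (fun ip => !(PySem.Str.startswith ip "127."))
  match external_ips.filter (fun ip => PySem.Str.startswith ip "10.") with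
  | v :: _ => v
  | [] =>
    match external_ips.filter (fun ip => PySem.Str.startswith ip "192.168.") with
    | s :: _ => s
    | [] =>
      match PySem.List.sorted (external_ips.filter (fun ip => PySem.Str.startswith ip "172.")) octet172 with
      | p :: _ => p
      | [] =>
        match external_ips with
        | e :: _ => e
        | [] => "127.0.0.1"

-- ===== PORT B =====
def pyTier (ip : String) : Nat :=
  if PySem.Str.startswith ip "10." then 0
  else if PySem.Str.startswith ip "192.168." then 1
  else if PySem.Str.startswith ip "172." then 2
  else 3

def get_primary_ip_py_alt (ip_addresses : List String) : String :=
  let best := ip_addresses.foldl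
    (fun b ip => if PySem.Str.startswith ip "127." then b
                 else if pyTier ip < b then pyTier ip else b) 4
  if best = 4 then "127.0.0.1"
  else if best = 2 then
    match ip_addresses.foldl
      (fun (acc : Option (String × Int)) ip =>
        if PySem.Str.startswith ip "172." then
          let o := octet172 ip
          match acc with
          | none => some (ip, o)
          | some (c, bo) => if o < bo then some (ip, o) else some (c, bo)
        else acc) none with
    | some (c, _) => c
    | none => "127.0.0.1"
  else
    match ip_addresses.find? (fun ip => !(PySem.Str.startswith ip "127.") && pyTier ip == best) with
    | some ip => ip
    | none => "127.0.0.1"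

-- ===== PRECONDITION & SPEC =====
-- Pre_ excludes exactly the inputs where Python A raises ValueError: no non-localhost
-- 10./192.168. address present, yet some non-localhost 172. address whose second
-- dot-field is not a valid int literal (B raises there too).
def Pre_get_primary_ip_py (ip_addresses : List String) : Prop :=
  (∃ ip ∈ ip_addresses, ¬ PySem.Str.startswith ip "127." ∧
      (PySem.Str.startswith ip "10." ∨ PySem.Str.startswith ip "192.168.")) ∨
  (∀ ip ∈ ip_addresses, PySem.Str.startswith ip "172." →
      (PySem.Int.ofStr? (((PySem.Str.split? ip ".").getD []).getD 1 "")).isSome)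
instance (ip_addresses : List String) : Decidable (Pre_get_primary_ip_py ip_addresses) := by
  unfold Pre_get_primary_ip_py; infer_instance
def pvWitness_get_primary_ip_py : List String := ["127.0.0.1", "172.17.0.2", "172.16.0.9"]

def Spec_get_primary_ip_py (ip_addresses : List String) (out : String) : Prop := out = get_primary_ip_py_alt ip_addresses
instance (ip_addresses : List String) (out : String) : Decidable (Spec_get_primary_ip_py ip_addresses out) := by unfold Spec_get_primary_ip_py; infer_instance

-- ===== CLAIM (what is proved, stated in full; the proofs are below) =====
def Claim_equal_get_primary_ip_py : Prop := ∀ (ip_addresses : List String), Dom_get_primary_ip_py ip_addresses → Pre_get_primary_ip_py ip_addresses → Spec_get_primary_ip_py ip_addresses (get_primary_ip_py ip_addresses)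

-- ===== LEMMAS AND PROOFS =====

theorem pyTier_cases (ip : String) :
    (pyTier ip = 0 ∧ PySem.Str.startswith ip "10.") ∨
    (pyTier ip = 1 ∧ ¬ PySem.Str.startswith ip "10." ∧ PySem.Str.startswith ip "192.168.") ∨
    (pyTier ip = 2 ∧ ¬ PySem.Str.startswith ip "10." ∧ ¬ PySem.Str.startswith ip "192.168." ∧ PySem.Str.startswith ip "172.") ∨
    (pyTier ip = 3 ∧ ¬ PySem.Str.startswith ip "10." ∧ ¬ PySem.Str.startswith ip "192.168." ∧ ¬ PySem.Str.startswith ip "172.") := by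
  unfold pyTier; split_ifs <;> simp_all

-- prefix-disjointness of the network prefixes
theorem prefix_disjoint (p q s : List Char)
    (hpq : ∀ t u : List Char, p ++ t ≠ q ++ u)
    (h : PySem.Chars.startswith s p = true) :
    PySem.Chars.startswith s q = false := by
  obtain ⟨t, ht⟩ := (PySem.Chars.startswith_iff _ _).mp h
  by_contra hc
  obtain ⟨u, hu⟩ := (PySem.Chars.startswith_iff _ _).mp (by simpa using hc)
  rw [← ht] at hu
  exact hpq t u hu.symm
theorem c10_of_192 (s : List Char)
    (h : PySem.Chars.startswith s ['1', '9', '2', '.', '1', '6', '8', '.'] = true) :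
    PySem.Chars.startswith s ['1', '0', '.'] = false :=
  prefix_disjoint _ _ s (by intro t u hq; simp at hq) h
theorem c127_of_172 (s : List Char)
    (h : PySem.Chars.startswith s ['1', '7', '2', '.'] = true) :
    PySem.Chars.startswith s ['1', '2', '7', '.'] = false :=
  prefix_disjoint _ _ s (by intro t u hq; simp at hq) h

-- the tier fold is a running minimum
theorem minfold_le_init (l : List Nat) (a : Nat) :
    l.foldl (fun b t => if t < b then t else b) a ≤ a := by
  induction l generalizing a with
  | nil => simp
  | cons x xs ih =>
    simp only [List.foldl_cons]
    exact le_trans (ih _) (by split <;> omega)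

theorem minfold_le_mem (l : List Nat) (a x : Nat) (hx : x ∈ l) :
    l.foldl (fun b t => if t < b then t else b) a ≤ x := by
  induction l generalizing a with
  | nil => cases hx
  | cons y ys ih =>
    simp only [List.foldl_cons]
    rcases List.mem_cons.mp hx with rfl | h
    · exact le_trans (minfold_le_init _ _) (by split <;> omega)
    · exact ih _ h

theorem minfold_attained (l : List Nat) (a : Nat) :
    l.foldl (fun b t => if t < b then t else b) a = a ∨
    l.foldl (fun b t => if t < b then t else b) a ∈ l := by
  induction l generalizing a with
  | nil => simp
  | cons y ys ih =>
    simp only [List.foldl_cons]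
    rcases ih (if y < a then y else a) with h | h
    · rw [h]; split at h <;> simp_all
    · right; exact List.mem_cons_of_mem _ h

-- head of A's stable sort = left-to-right strict minimum
theorem insertBy_head (x y : String) (ys : List String) :
    PySem.List.insertBy (fun a b => decide (octet172 a < octet172 b)) x (y :: ys) =
      if octet172 x < octet172 y then x :: y :: ys
      else y :: PySem.List.insertBy (fun a b => decide (octet172 a < octet172 b)) x ys := by
  simp [PySem.List.insertBy]

theorem foldl_ins_head (l : List String) (m : String) (acc : List String) :
    (l.foldl (fun a i => PySem.List.insertBy (fun a b => decide (octet172 a < octet172 b)) i a) (m :: acc)).head? =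
      some (l.foldl (fun c i => if octet172 i < octet172 c then i else c) m) := by
  induction l generalizing m acc with
  | nil => simp
  | cons x xs ih =>
    simp only [List.foldl_cons, insertBy_head]
    split
    · exact ih _ _
    · exact ih _ _

theorem head_sorted_eq_minfold (x : String) (l : List String) :
    (PySem.List.sorted (x :: l) octet172).head? =
      some (l.foldl (fun c i => if octet172 i < octet172 c then i else c) x) := by
  rw [PySem.List.sorted_eq_foldl_insertBy]
  simp only [List.foldl_cons]
  exact foldl_ins_head l x []

-- B's option fold computes the same strict minimum
theorem optfold_eq_minfold (l : List String) (c : String) :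
    (l.foldl
      (fun (acc : Option (String × Int)) ip =>
        if PySem.Str.startswith ip "172." then
          let o := octet172 ip
          match acc with
          | none => some (ip, o)
          | some (c, bo) => if o < bo then some (ip, o) else some (c, bo)
        else acc) (some (c, octet172 c))) =
    some ((l.filter (fun ip => PySem.Str.startswith ip "172.")).foldl
      (fun c i => if octet172 i < octet172 c then i else c) c,
      octet172 ((l.filter (fun ip => PySem.Str.startswith ip "172.")).foldl
      (fun c i => if octet172 i < octet172 c then i else c) c)) := by
  induction l generalizing c with
  | nil => simp
  | cons x xs ih =>
    simp only [List.foldl_cons, List.filter_cons]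
    by_cases h : PySem.Str.startswith x "172." = true
    · rw [if_pos h, if_pos h]
      simp only [List.foldl_cons]
      by_cases ho : octet172 x < octet172 c
      · rw [if_pos ho, if_pos ho]; exact ih x
      · rw [if_neg ho, if_neg ho]; exact ih c
    · rw [if_neg h, if_neg h]; exact ih c

-- starting from none: B's option fold over the whole list, described via the 172-filter
theorem optfold_none (l : List String) :
    (l.foldl
      (fun (acc : Option (String × Int)) ip =>
        if PySem.Str.startswith ip "172." then
          let o := octet172 ip
          match acc with
          | none => some (ip, o)
          | some (c, bo) => if o < bo then some (ip, o) else some (c, bo)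
        else acc) none) =
    match l.filter (fun ip => PySem.Str.startswith ip "172.") with
    | [] => none
    | p :: t => some (t.foldl (fun c i => if octet172 i < octet172 c then i else c) p,
        octet172 (t.foldl (fun c i => if octet172 i < octet172 c then i else c) p)) := by
  induction l with
  | nil => simp
  | cons x xs ih =>
    simp only [List.foldl_cons, List.filter_cons]
    by_cases h : PySem.Str.startswith x "172." = true
    · rw [if_pos h, if_pos h]
      exact optfold_eq_minfold xs x
    · rw [if_neg h, if_neg h]
      exact ih

-- boolean characterisations of the tiers
theorem tier0b (ip : String) : (pyTier ip == 0) = PySem.Str.startswith ip "10." := by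
  unfold pyTier; split_ifs <;> simp_all
theorem tier1b (ip : String) :
    (pyTier ip == 1) = (!(PySem.Str.startswith ip "10.") && PySem.Str.startswith ip "192.168.") := by
  unfold pyTier; split_ifs <;> simp_all
-- B's first fold = running minimum of the tiers of the non-localhost addresses
theorem best_eq (ips : List String) :
    ips.foldl (fun b ip => if PySem.Str.startswith ip "127." then b
                           else if pyTier ip < b then pyTier ip else b) 4 =
    ((ips.filter (fun ip => !(PySem.Str.startswith ip "127."))).map pyTier).foldl
      (fun b t => if t < b then t else b) 4 := by
  rw [List.foldl_map, List.foldl_filter]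
  congr 1
  funext b ip
  by_cases h : PySem.Chars.startswith ip.toList ['1', '2', '7', '.'] = true <;> simp [h]

theorem ports_agree (ips : List String) : get_primary_ip_py ips = get_primary_ip_py_alt ips := by
  simp only [get_primary_ip_py, get_primary_ip_py_alt]
  rw [best_eq]
  set E := ips.filter (fun ip => !(PySem.Str.startswith ip "127.")) with hE
  set b := (E.map pyTier).foldl (fun b t => if t < b then t else b) 4 with hb
  have hball : ∀ ip ∈ E, b ≤ pyTier ip := fun ip hip =>
    minfold_le_mem _ _ _ (List.mem_map_of_mem hip)
  have hbatt : b = 4 ∨ ∃ ip ∈ E, pyTier ip = b := by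
    rcases minfold_attained (E.map pyTier) 4 with h | h
    · exact Or.inl h
    · right; obtain ⟨ip, hip, ht⟩ := List.mem_map.mp h; exact ⟨ip, hip, ht⟩
  cases h10 : E.filter (fun ip => PySem.Str.startswith ip "10.") with
  | cons v r =>
    have hv := List.mem_filter.mp (h10 ▸ List.mem_cons_self (l := r))
    have htv : pyTier v = 0 := by unfold pyTier; rw [if_pos hv.2]
    have hb0 : b = 0 := Nat.le_zero.mp (htv ▸ hball v hv.1)
    rw [hb0, if_neg (by decide : ¬(0:ℕ) = 4), if_neg (by decide : ¬(0:ℕ) = 2)]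
    have hfind : ips.find? (fun ip => !(PySem.Str.startswith ip "127.") && (pyTier ip == 0)) =
        some v := by
      rw [← List.head?_filter]
      have hfe : ips.filter (fun ip => !(PySem.Str.startswith ip "127.") && (pyTier ip == 0)) =
          E.filter (fun ip => PySem.Str.startswith ip "10.") := by
        rw [hE, List.filter_filter]
        congr 1; funext ip; rw [tier0b, Bool.and_comm]
      rw [hfe, h10]; rfl
    rw [hfind]
  | nil =>
    have no10 : ∀ ip ∈ E, ¬ PySem.Str.startswith ip "10." = true :=
      fun ip hip => by simpa using List.filter_eq_nil_iff.mp h10 ip hip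
    cases h192 : E.filter (fun ip => PySem.Str.startswith ip "192.168.") with
    | cons v r =>
      have hv := List.mem_filter.mp (h192 ▸ List.mem_cons_self (l := r))
      have htv : pyTier v = 1 := by
        unfold pyTier; rw [if_neg (no10 v hv.1), if_pos hv.2]
      have hb1 : b = 1 := by
        have hle : b ≤ 1 := htv ▸ hball v hv.1
        rcases hbatt with h | ⟨ip, hip, ht⟩
        · omega
        · rcases pyTier_cases ip with ⟨h0, hs⟩ | ⟨h1, _⟩ | ⟨h2, _⟩ | ⟨h3, _⟩
          · exact absurd hs (no10 ip hip)
          · omega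
          · omega
          · omega
      rw [hb1, if_neg (by decide : ¬(1:ℕ) = 4), if_neg (by decide : ¬(1:ℕ) = 2)]
      have hfind : ips.find? (fun ip => !(PySem.Str.startswith ip "127.") && (pyTier ip == 1)) =
          some v := by
        rw [← List.head?_filter]
        have hfe : ips.filter (fun ip => !(PySem.Str.startswith ip "127.") && (pyTier ip == 1)) =
            E.filter (fun ip => PySem.Str.startswith ip "192.168.") := by
          rw [hE, List.filter_filter]
          congr 1; funext ip
          rw [tier1b]
          simp only [PySem.Str.startswith_eq]
          cases h9 : PySem.Chars.startswith ip.toList ['1', '9', '2', '.', '1', '6', '8', '.']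
          · simp [h9]
          · simp [h9, c10_of_192 ip.toList h9]
        rw [hfe, h192]; rfl
      rw [hfind]
    | nil =>
      have no192 : ∀ ip ∈ E, ¬ PySem.Str.startswith ip "192.168." = true :=
        fun ip hip => by simpa using List.filter_eq_nil_iff.mp h192 ip hip
      cases h172 : E.filter (fun ip => PySem.Str.startswith ip "172.") with
      | cons p t =>
        have hp := List.mem_filter.mp (h172 ▸ List.mem_cons_self (l := t))
        have htp : pyTier p = 2 := by
          unfold pyTier; rw [if_neg (no10 p hp.1), if_neg (no192 p hp.1), if_pos hp.2]
        have hb2 : b = 2 := by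
          have hle : b ≤ 2 := htp ▸ hball p hp.1
          rcases hbatt with h | ⟨ip, hip, ht⟩
          · omega
          · rcases pyTier_cases ip with ⟨h0, hs⟩ | ⟨h1, _, hs⟩ | ⟨h2, _⟩ | ⟨h3, _⟩
            · exact absurd hs (no10 ip hip)
            · exact absurd hs (no192 ip hip)
            · omega
            · omega
        rw [hb2, if_neg (by decide : ¬(2:ℕ) = 4), if_pos rfl]
        -- A side: head of the stable sort
        have hs := head_sorted_eq_minfold p t
        cases hsrt : PySem.List.sorted (p :: t) octet172 with
        | nil => exact absurd ((PySem.List.sorted_eq_nil_iff _ _ _).mp hsrt) (by simp)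
        | cons a as =>
          rw [hsrt] at hs
          have ha : a = t.foldl (fun c i => if octet172 i < octet172 c then i else c) p := by
            simpa using hs
          -- B side: the option fold over ips, via the 172-filtered list
          have h172all : ips.filter (fun ip => PySem.Str.startswith ip "172.") = p :: t := by
            rw [← h172, hE, List.filter_filter]
            congr 1; funext ip
            simp only [PySem.Str.startswith_eq]
            cases h7 : PySem.Chars.startswith ip.toList ['1', '7', '2', '.']
            · simp [h7]
            · simp [h7, c127_of_172 ip.toList h7]
          rw [optfold_none ips, h172all]
          exact ha
      | nil =>
        have no172 : ∀ ip ∈ E, ¬ PySem.Str.startswith ip "172." = true :=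
          fun ip hip => by simpa using List.filter_eq_nil_iff.mp h172 ip hip
        rw [show PySem.List.sorted ([] : List String) octet172 = [] from rfl]
        cases hEc : E with
        | nil =>
          rw [hb, hEc]
          rfl
        | cons e r =>
          have hte : pyTier e = 3 := by
            have he : e ∈ E := hEc ▸ List.mem_cons_self (l := r)
            unfold pyTier
            rw [if_neg (no10 e he), if_neg (no192 e he), if_neg (no172 e he)]
          have hb3 : b = 3 := by
            have hle : b ≤ 3 := hte ▸ hball e (hEc ▸ List.mem_cons_self (l := r))
            rcases hbatt with h | ⟨ip, hip, ht⟩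
            · omega
            · rcases pyTier_cases ip with ⟨h0, hs⟩ | ⟨h1, _, hs⟩ | ⟨h2, _, _, hs⟩ | ⟨h3, _⟩
              · exact absurd hs (no10 ip hip)
              · exact absurd hs (no192 ip hip)
              · exact absurd hs (no172 ip hip)
              · omega
          rw [hb3, if_neg (by decide : ¬(3:ℕ) = 4), if_neg (by decide : ¬(3:ℕ) = 2)]
          have hfind : ips.find? (fun ip => !(PySem.Str.startswith ip "127.") && (pyTier ip == 3)) =
              some e := by
            rw [← List.head?_filter]
            have hfe : ips.filter (fun ip => !(PySem.Str.startswith ip "127.") && (pyTier ip == 3)) = E := by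
              rw [hE]
              rw [show (fun ip => !(PySem.Str.startswith ip "127.") && (pyTier ip == 3))
                  = (fun ip => (pyTier ip == 3) && !(PySem.Str.startswith ip "127.")) from by
                funext ip; rw [Bool.and_comm]]
              rw [← List.filter_filter, ← hE]
              apply List.filter_eq_self.mpr
              intro x hx
              rcases pyTier_cases x with ⟨h0, hs⟩ | ⟨h1, _, hs⟩ | ⟨h2, _, _, hs⟩ | ⟨h3, _⟩
              · exact absurd hs (no10 x hx)
              · exact absurd hs (no192 x hx)
              · exact absurd hs (no172 x hx)
              · simp [h3]
            rw [hfe, hEc]; rfl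
          rw [hfind]

-- ===== VERDICT (by name: the statement is the Claim_ definition above) =====
theorem get_primary_ip_py_spec : Claim_equal_get_primary_ip_py := by
  intro ips _ _
  unfold Spec_get_primary_ip_py
  exact ports_agree ips
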